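-- pv_equiv track=rewrite | github.com/RikVoorhaar/routing-game | osm_utils/src/osm_utils/way_simplifier.py | simplify_node_refs
-- ===== SOURCE A (Python) =====
-- from typing import Dict, List, Optional, Protocol, Sequence, Tuple
--
-- def simplify_node_refs(node_refs: Sequence[int], kept_nodes: "set[int]") -> List[int]:
--     """
--     Simplify a node reference list to only include kept nodes (plus endpoints).
--
--     Parameters
--     ---------------
--     node_refs: Sequence[int]
--         Original node IDs in order.
--     kept_nodes: set[int]
--         Node IDs that must be preserved.
--
--     Returns
--     -----------
--     list[int]
--         Simplified node ID list (endpoints preserved).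
--     """
--     if len(node_refs) < 2:
--         return []
--
--     out: List[int] = [int(node_refs[0])]
--     for ref in node_refs[1:-1]:
--         r = int(ref)
--         if r in kept_nodes and r != out[-1]:
--             out.append(r)
--
--     last = int(node_refs[-1])
--     if last != out[-1]:
--         out.append(last)
--     return out
-- ===== SOURCE B (Python) =====
-- def simplify_node_refs(node_refs, kept_nodes):
--     if len(node_refs) < 2:
--         return []
--     # pass 1: build the candidate list (endpoints + kept interior nodes)
--     candidates = (
--         [int(node_refs[0])]
--         + [r for r in (int(x) for x in node_refs[1:-1]) if r in kept_nodes]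
--         + [int(node_refs[-1])]
--     )
--     # pass 2: collapse consecutive duplicates
--     result = []
--     for x in candidates:
--         if not result or x != result[-1]:
--             result.append(x)
--     return result
-- ===== Notes on version B (the rewrite author's own statement) =====
-- stated objective: alternative
-- what changed: Replaces A's single interleaved loop (membership test fused with last-element dedup on a growing output) by two sequential passes: a comprehension building endpoint+kept candidates, then a separate consecutive-duplicate collapse pass.
import Mathlib
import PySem

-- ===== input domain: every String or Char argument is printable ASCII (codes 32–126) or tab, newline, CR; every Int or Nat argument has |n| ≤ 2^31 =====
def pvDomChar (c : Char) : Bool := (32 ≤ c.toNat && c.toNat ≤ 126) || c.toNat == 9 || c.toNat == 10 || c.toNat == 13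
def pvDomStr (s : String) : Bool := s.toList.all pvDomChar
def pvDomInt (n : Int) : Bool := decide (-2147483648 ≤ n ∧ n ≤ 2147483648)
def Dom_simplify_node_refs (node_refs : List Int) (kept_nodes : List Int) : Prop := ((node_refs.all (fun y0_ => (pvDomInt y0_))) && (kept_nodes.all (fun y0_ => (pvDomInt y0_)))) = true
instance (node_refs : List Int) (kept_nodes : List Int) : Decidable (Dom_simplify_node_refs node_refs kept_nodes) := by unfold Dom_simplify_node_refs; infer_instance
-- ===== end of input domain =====

-- B replaces A's single interleaved loop by two sequential passes (candidate selection, then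
-- consecutive-duplicate collapse); same cost, different decomposition (objective: alternative).

-- ===== PORT A =====
-- loop body of A: if r in kept_nodes and r != out[-1]: out.append(r)
-- (out[-1] is `out.getLast!`: exact here since out is nonempty throughout the loop)
def pvStepA (kept_nodes : List Int) (out : List Int) (r : Int) : List Int :=
  if r ∈ kept_nodes ∧ r ≠ out.getLast! then out ++ [r] else out

def simplify_node_refs (node_refs : List Int) (kept_nodes : List Int) : List Int :=
  if node_refs.length < 2 then []
  else
    -- node_refs[0] on a list of length ≥ 2: headI is exact
    let out := [node_refs.headI]
    let out := (PySem.List.slice node_refs (some 1) (some (-1))).foldl (pvStepA kept_nodes) out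
    -- node_refs[-1] on a nonempty list: getLast! is exact
    let last := node_refs.getLast!
    if last ≠ out.getLast! then out ++ [last] else out

-- ===== PORT B =====
-- collapse-pass body: if not result or x != result[-1]: result.append(x)
def pvCollapse (result : List Int) (x : Int) : List Int :=
  if result = [] ∨ x ≠ result.getLast! then result ++ [x] else result

def simplify_node_refs_alt (node_refs : List Int) (kept_nodes : List Int) : List Int :=
  if node_refs.length < 2 then []
  else
    let candidates :=
      [node_refs.headI]
      ++ (PySem.List.slice node_refs (some 1) (some (-1))).filter (fun r => decide (r ∈ kept_nodes))
      ++ [node_refs.getLast!]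
    candidates.foldl pvCollapse []

-- ===== PRECONDITION & SPEC =====
def Spec_simplify_node_refs (node_refs : List Int) (kept_nodes : List Int) (out : List Int) : Prop := out = simplify_node_refs_alt node_refs kept_nodes
instance (node_refs : List Int) (kept_nodes : List Int) (out : List Int) : Decidable (Spec_simplify_node_refs node_refs kept_nodes out) := by unfold Spec_simplify_node_refs; infer_instance

-- ===== CLAIM (what is proved, stated in full; the proofs are below) =====
def Claim_equal_simplify_node_refs : Prop := ∀ (node_refs : List Int) (kept_nodes : List Int), Dom_simplify_node_refs node_refs kept_nodes → Spec_simplify_node_refs node_refs kept_nodes (simplify_node_refs node_refs kept_nodes)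

-- ===== LEMMAS AND PROOFS =====

theorem pvCollapse_ne_nil (l : List Int) (acc : List Int) (h : acc ≠ []) :
    l.foldl pvCollapse acc ≠ [] := by
  induction l generalizing acc with
  | nil => exact h
  | cons x t ih =>
    simp only [List.foldl_cons]
    apply ih
    unfold pvCollapse
    split_ifs with h' <;> simp [h]

theorem pv_loop_eq (kept_nodes : List Int) (mids : List Int) (acc : List Int) (h : acc ≠ []) :
    mids.foldl (pvStepA kept_nodes) acc
      = (mids.filter (fun r => decide (r ∈ kept_nodes))).foldl pvCollapse acc := by
  induction mids generalizing acc with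
  | nil => rfl
  | cons r t ih =>
    by_cases hm : r ∈ kept_nodes
    · simp only [List.foldl_cons, List.filter_cons, hm, decide_true, if_true, List.foldl_cons]
      have hstep : pvStepA kept_nodes acc r = pvCollapse acc r := by
        unfold pvStepA pvCollapse
        by_cases hlast : r ≠ acc.getLast!
        · rw [if_pos ⟨hm, hlast⟩, if_pos (Or.inr hlast)]
        · rw [if_neg (by tauto), if_neg (by tauto)]
      rw [hstep]
      apply ih
      unfold pvCollapse
      split_ifs <;> simp [h]
    · simp only [List.foldl_cons, List.filter_cons, hm, decide_false]
      have hstep : pvStepA kept_nodes acc r = acc := by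
        unfold pvStepA; rw [if_neg (by tauto)]
      rw [hstep]
      exact ih acc h

-- ===== VERDICT (by name: the statement is the Claim_ definition above) =====
theorem simplify_node_refs_spec : Claim_equal_simplify_node_refs := by
  intro node_refs kept_nodes _
  unfold Spec_simplify_node_refs simplify_node_refs simplify_node_refs_alt
  by_cases h : node_refs.length < 2
  · simp [h]
  · simp only [h, if_false]
    set filt := (PySem.List.slice node_refs (some 1) (some (-1))).filter
      (fun r => decide (r ∈ kept_nodes)) with hfilt
    have hcand : ([node_refs.headI] ++ filt ++ [node_refs.getLast!]).foldl pvCollapse []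
        = pvCollapse (filt.foldl pvCollapse [node_refs.headI]) node_refs.getLast! := by
      rw [List.foldl_append, List.foldl_append]
      simp [pvCollapse]
    rw [hcand, hfilt, ← pv_loop_eq kept_nodes _ [node_refs.headI] (by simp)]
    set out := (PySem.List.slice node_refs (some 1) (some (-1))).foldl
      (pvStepA kept_nodes) [node_refs.headI] with hout
    have hne : out ≠ [] := by
      rw [hout, pv_loop_eq kept_nodes _ _ (by simp)]
      exact pvCollapse_ne_nil _ _ (by simp)
    unfold pvCollapse
    split_ifs with h1 h2 <;> first | rfl | tauto
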